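-- pv_equiv track=rewrite | github.com/Cogaid/agent-skills | skills/sales/cold-outreach-writer/scripts/outreach_generator.py | detect_role_category
-- ===== SOURCE A (Python) =====
-- def detect_role_category(role):
--     """Detect role category from title."""
--     role_lower = role.lower()
--
--     if any(word in role_lower for word in ["sales", "revenue", "business development", "account"]):
--         return "sales"
--     elif any(word in role_lower for word in ["marketing", "growth", "demand", "content"]):
--         return "marketing"
--     elif any(word in role_lower for word in ["engineering", "technical", "developer", "cto"]):
--         return "engineering"
--     elif any(word in role_lower for word in ["hr", "people", "talent", "culture"]):
--         return "hr"
--     elif any(word in role_lower for word in ["operations", "ops", "coo", "process"]):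
--         return "operations"
--     else:
--         return "default"
-- ===== SOURCE B (Python) =====
-- # Inverted index: keyword -> (priority, category); single pass keeping the
-- # minimum-priority match, instead of an ordered category cascade.
-- KEYWORD_CATEGORY = {
--     "sales": (0, "sales"), "revenue": (0, "sales"),
--     "business development": (0, "sales"), "account": (0, "sales"),
--     "marketing": (1, "marketing"), "growth": (1, "marketing"),
--     "demand": (1, "marketing"), "content": (1, "marketing"),
--     "engineering": (2, "engineering"), "technical": (2, "engineering"),
--     "developer": (2, "engineering"), "cto": (2, "engineering"),
--     "hr": (3, "hr"), "people": (3, "hr"),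
--     "talent": (3, "hr"), "culture": (3, "hr"),
--     "operations": (4, "operations"), "ops": (4, "operations"),
--     "coo": (4, "operations"), "process": (4, "operations"),
-- }
--
--
-- def detect_role_category(role):
--     """Detect role category from title."""
--     role_lower = role.lower()
--     best = (5, "default")
--     for keyword, cat in KEYWORD_CATEGORY.items():
--         if keyword in role_lower and cat < best:
--             best = cat
--     return best[1]
-- ===== Notes on version B (the rewrite author's own statement) =====
-- stated objective: alternative
-- what changed: Inverts the data: a keyword->(priority, category) index with a single min-priority reduction over all matching keywords replaces the ordered if/elif category cascade with early return.
import Mathlib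
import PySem

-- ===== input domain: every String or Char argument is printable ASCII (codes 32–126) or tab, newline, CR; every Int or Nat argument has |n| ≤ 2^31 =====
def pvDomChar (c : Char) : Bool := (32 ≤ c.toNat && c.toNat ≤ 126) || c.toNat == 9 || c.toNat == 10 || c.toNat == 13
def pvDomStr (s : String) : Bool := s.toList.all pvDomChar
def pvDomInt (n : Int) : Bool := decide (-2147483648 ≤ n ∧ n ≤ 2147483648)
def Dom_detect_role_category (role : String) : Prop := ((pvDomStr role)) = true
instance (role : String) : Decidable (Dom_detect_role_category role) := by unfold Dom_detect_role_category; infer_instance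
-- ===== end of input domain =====

-- B inverts the data: a keyword -> (priority, category) index reduced with a running minimum
-- replaces A's ordered if/elif category cascade (alternative decomposition, same cost).

-- ===== PORT A =====
def detect_role_category (role : String) : String :=
  let role_lower := PySem.Str.lower role
  if (["sales", "revenue", "business development", "account"] : List String).any
      (fun word => PySem.Str.isIn word role_lower) then "sales"
  else if (["marketing", "growth", "demand", "content"] : List String).any
      (fun word => PySem.Str.isIn word role_lower) then "marketing"
  else if (["engineering", "technical", "developer", "cto"] : List String).any
      (fun word => PySem.Str.isIn word role_lower) then "engineering"
  else if (["hr", "people", "talent", "culture"] : List String).any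
      (fun word => PySem.Str.isIn word role_lower) then "hr"
  else if (["operations", "ops", "coo", "process"] : List String).any
      (fun word => PySem.Str.isIn word role_lower) then "operations"
  else "default"

-- ===== PORT B =====
-- the KEYWORD_CATEGORY dict (insertion order)
def pvKwCat : List (String × Int × String) :=
  [("sales", 0, "sales"), ("revenue", 0, "sales"),
   ("business development", 0, "sales"), ("account", 0, "sales"),
   ("marketing", 1, "marketing"), ("growth", 1, "marketing"),
   ("demand", 1, "marketing"), ("content", 1, "marketing"),
   ("engineering", 2, "engineering"), ("technical", 2, "engineering"),
   ("developer", 2, "engineering"), ("cto", 2, "engineering"),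
   ("hr", 3, "hr"), ("people", 3, "hr"),
   ("talent", 3, "hr"), ("culture", 3, "hr"),
   ("operations", 4, "operations"), ("ops", 4, "operations"),
   ("coo", 4, "operations"), ("process", 4, "operations")]

-- Python's tuple '<' on (int, str), lexicographic
def pvPairLt (a b : Int × String) : Bool :=
  decide (a.1 < b.1) || (a.1 == b.1 && decide (a.2 < b.2))

def detect_role_category_alt (role : String) : String :=
  let role_lower := PySem.Str.lower role
  (pvKwCat.foldl
      (fun best e =>
        if PySem.Str.isIn e.1 role_lower && pvPairLt e.2 best then e.2 else best)
      ((5 : Int), "default")).2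

-- ===== PRECONDITION & SPEC =====
def Spec_detect_role_category (role : String) (out : String) : Prop := out = detect_role_category_alt role
instance (role : String) (out : String) : Decidable (Spec_detect_role_category role out) := by unfold Spec_detect_role_category; infer_instance

-- ===== CLAIM (what is proved, stated in full; the proofs are below) =====
def Claim_equal_detect_role_category : Prop := ∀ (role : String), Dom_detect_role_category role → Spec_detect_role_category role (detect_role_category role)

-- ===== LEMMAS AND PROOFS =====
@[simp] theorem pvPairLt_lt (a b : Int × String) (h : a.1 < b.1) : pvPairLt a b = true := by
  simp [pvPairLt, h]
@[simp] theorem pvPairLt_gt (a b : Int × String) (h : b.1 < a.1) : pvPairLt a b = false := by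
  have h1 : ¬ a.1 < b.1 := by omega
  have h2 : a.1 ≠ b.1 := by omega
  simp [pvPairLt, h1, h2]
@[simp] theorem pvPairLt_self (a : Int × String) : pvPairLt a a = false := by
  simp [pvPairLt]

-- ===== VERDICT (by name: the statement is the Claim_ definition above) =====
theorem detect_role_category_spec : Claim_equal_detect_role_category := by
  intro role _
  unfold Spec_detect_role_category detect_role_category detect_role_category_alt pvKwCat
  set rl := PySem.Str.lower role with hrl
  clear hrl
  by_cases h1 : PySem.Str.isIn "sales" rl = true
  · simp at h1; simp [h1]
  · simp at h1
    by_cases h2 : PySem.Str.isIn "revenue" rl = true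
    · simp at h2; simp [h1, h2]
    · simp at h2
      by_cases h3 : PySem.Str.isIn "business development" rl = true
      · simp at h3; simp [h1, h2, h3]
      · simp at h3
        by_cases h4 : PySem.Str.isIn "account" rl = true
        · simp at h4; simp [h1, h2, h3, h4]
        · simp at h4
          by_cases h5 : PySem.Str.isIn "marketing" rl = true
          · simp at h5; simp [h1, h2, h3, h4, h5]
          · simp at h5
            by_cases h6 : PySem.Str.isIn "growth" rl = true
            · simp at h6; simp [h1, h2, h3, h4, h5, h6]
            · simp at h6
              by_cases h7 : PySem.Str.isIn "demand" rl = true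
              · simp at h7; simp [h1, h2, h3, h4, h5, h6, h7]
              · simp at h7
                by_cases h8 : PySem.Str.isIn "content" rl = true
                · simp at h8; simp [h1, h2, h3, h4, h5, h6, h7, h8]
                · simp at h8
                  by_cases h9 : PySem.Str.isIn "engineering" rl = true
                  · simp at h9; simp [h1, h2, h3, h4, h5, h6, h7, h8, h9]
                  · simp at h9
                    by_cases h10 : PySem.Str.isIn "technical" rl = true
                    · simp at h10; simp [h1, h2, h3, h4, h5, h6, h7, h8, h9, h10]
                    · simp at h10
                      by_cases h11 : PySem.Str.isIn "developer" rl = true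
                      · simp at h11; simp [h1, h2, h3, h4, h5, h6, h7, h8, h9, h10, h11]
                      · simp at h11
                        by_cases h12 : PySem.Str.isIn "cto" rl = true
                        · simp at h12; simp [h1, h2, h3, h4, h5, h6, h7, h8, h9, h10, h11, h12]
                        · simp at h12
                          by_cases h13 : PySem.Str.isIn "hr" rl = true
                          · simp at h13; simp [h1, h2, h3, h4, h5, h6, h7, h8, h9, h10, h11, h12, h13]
                          · simp at h13
                            by_cases h14 : PySem.Str.isIn "people" rl = true
                            · simp at h14; simp [h1, h2, h3, h4, h5, h6, h7, h8, h9, h10, h11, h12, h13, h14]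
                            · simp at h14
                              by_cases h15 : PySem.Str.isIn "talent" rl = true
                              · simp at h15; simp [h1, h2, h3, h4, h5, h6, h7, h8, h9, h10, h11, h12, h13, h14, h15]
                              · simp at h15
                                by_cases h16 : PySem.Str.isIn "culture" rl = true
                                · simp at h16; simp [h1, h2, h3, h4, h5, h6, h7, h8, h9, h10, h11, h12, h13, h14, h15, h16]
                                · simp at h16
                                  by_cases h17 : PySem.Str.isIn "operations" rl = true
                                  · simp at h17; simp [h1, h2, h3, h4, h5, h6, h7, h8, h9, h10, h11, h12, h13, h14, h15, h16, h17]
                                  · simp at h17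
                                    by_cases h18 : PySem.Str.isIn "ops" rl = true
                                    · simp at h18; simp [h1, h2, h3, h4, h5, h6, h7, h8, h9, h10, h11, h12, h13, h14, h15, h16, h17, h18]
                                    · simp at h18
                                      by_cases h19 : PySem.Str.isIn "coo" rl = true
                                      · simp at h19; simp [h1, h2, h3, h4, h5, h6, h7, h8, h9, h10, h11, h12, h13, h14, h15, h16, h17, h18, h19]
                                      · simp at h19
                                        by_cases h20 : PySem.Str.isIn "process" rl = true
                                        · simp at h20; simp [h1, h2, h3, h4, h5, h6, h7, h8, h9, h10, h11, h12, h13, h14, h15, h16, h17, h18, h19, h20]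
                                        · simp at h20
                                          simp [h1, h2, h3, h4, h5, h6, h7, h8, h9, h10, h11, h12, h13, h14, h15, h16, h17, h18, h19, h20]
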